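-- pv_equiv track=rewrite | github.com/maxymilianz/CS-at-University-of-Wroclaw | AI/Solutions/1/e5.py | solved_column
-- ===== SOURCE A (Python) =====
-- def solved_column(column, pattern):
--     col_len = len(column)
--
--     def next_1(i):
--         while i < col_len and column[i] == 0:
--             i += 1
--         return i
--
--     i = next_1(0)
--
--     for n in pattern:
--         group_match = len([b for b in column[i:i+n] if b]) == n
--         if not group_match:
--             return False
--         i += n
--         new_i = next_1(i)
--         if i == new_i and i < col_len:
--             return False
--         i = new_i
--
--     return i == col_len
-- ===== SOURCE B (Python) =====
-- def solved_column(column, pattern):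
--     # Compute the run-lengths of maximal filled (nonzero) runs in one pass,
--     # then compare with the pattern (extra pattern entries must be 0).
--     runs = []
--     cur = 0
--     for b in column:
--         if b:
--             cur += 1
--         elif cur:
--             runs.append(cur)
--             cur = 0
--     if cur:
--         runs.append(cur)
--     k = len(runs)
--     return pattern[:k] == runs and all(n == 0 for n in pattern[k:])
-- ===== Notes on version B (the rewrite author's own statement) =====
-- stated objective: idiomatic
-- what changed: B computes the column's run-lengths once in a single forward pass and then compares that list with the pattern (allowing extra trailing/unmatched pattern entries only when they are 0), replacing A's pattern-guided index arithmetic with slicing, a nested zero-skipping while loop and separator checks.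
import Mathlib
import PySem

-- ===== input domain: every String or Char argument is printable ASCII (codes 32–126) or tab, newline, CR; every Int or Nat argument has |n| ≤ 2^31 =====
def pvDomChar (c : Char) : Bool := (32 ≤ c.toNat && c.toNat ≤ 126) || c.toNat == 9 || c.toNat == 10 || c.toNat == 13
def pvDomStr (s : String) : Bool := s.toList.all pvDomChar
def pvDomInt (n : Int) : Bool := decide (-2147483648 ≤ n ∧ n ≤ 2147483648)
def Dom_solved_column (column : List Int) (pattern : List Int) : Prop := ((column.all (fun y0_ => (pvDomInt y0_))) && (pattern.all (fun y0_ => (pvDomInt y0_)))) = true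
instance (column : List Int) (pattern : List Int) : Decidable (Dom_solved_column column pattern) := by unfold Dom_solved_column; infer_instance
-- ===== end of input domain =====

-- B replaces A's pattern-guided slicing/separator checks by one pass that collects the
-- column's run-lengths and a plain list comparison (idiomatic; same cost).

-- ===== PORT A =====
-- while i < col_len and column[i] == 0: i += 1   (fuel = column.length + 1 bounds the loop)
def pvNext1 (column : List Int) : Nat → Int → Int
  | 0, i => i
  | f + 1, i =>
    if i < (column.length : Int) ∧ PySem.List.pyGet? column i = some 0 then
      pvNext1 column f (i + 1)
    else i

-- the 'for n in pattern' loop with early returns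
def pvLoopA (column : List Int) : List Int → Int → Bool
  | [], i => i == (column.length : Int)
  | n :: rest, i =>
    let group_match :=
      ((((PySem.List.slice column (some i) (some (i + n))).filter (fun b => b != 0)).length : Int) == n)
    if !group_match then false
    else
      let i' := i + n
      let new_i := pvNext1 column (column.length + 1) i'
      if i' == new_i && i' < (column.length : Int) then false
      else pvLoopA column rest new_i

def solved_column (column : List Int) (pattern : List Int) : Bool :=
  pvLoopA column pattern (pvNext1 column (column.length + 1) 0)

-- ===== PORT B =====
def solved_column_alt (column : List Int) (pattern : List Int) : Bool :=
  let p := column.foldl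
    (fun (s : List Int × Int) b =>
      if b != 0 then (s.1, s.2 + 1)
      else if s.2 != 0 then (s.1 ++ [s.2], 0) else (s.1, s.2))
    ([], 0)
  let runs := if p.2 != 0 then p.1 ++ [p.2] else p.1
  let k := runs.length
  (pattern.take k == runs) && (pattern.drop k).all (fun n => n == 0)

-- ===== PRECONDITION & SPEC =====
def Spec_solved_column (column : List Int) (pattern : List Int) (out : Bool) : Prop := out = solved_column_alt column pattern
instance (column : List Int) (pattern : List Int) (out : Bool) : Decidable (Spec_solved_column column pattern out) := by unfold Spec_solved_column; infer_instance

-- ===== CLAIM (what is proved, stated in full; the proofs are below) =====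
def Claim_equal_solved_column : Prop := ∀ (column : List Int) (pattern : List Int), Dom_solved_column column pattern → Spec_solved_column column pattern (solved_column column pattern)

-- ===== LEMMAS AND PROOFS =====

-- run lengths of the maximal nonzero runs, counting through the current run with `cur`
def runsAux (cur : Int) : List Int → List Int
  | [] => if cur != 0 then [cur] else []
  | b :: t =>
    if b != 0 then runsAux (cur + 1) t
    else if cur != 0 then cur :: runsAux 0 t else runsAux 0 t

-- the common value both programs compute
def Bexpr (s : List Int) (pat : List Int) : Bool :=
  let runs := runsAux 0 s
  (pat.take runs.length == runs) && (pat.drop runs.length).all (fun n => n == 0)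

theorem runsAux_pos (t : List Int) : ∀ c : Int, 0 < c →
    runsAux c t = (c + ((t.takeWhile (fun b => b != 0)).length : Int)) :: runsAux 0 (t.dropWhile (fun b => b != 0)) := by
  induction t with
  | nil =>
    intro c hc
    have hne : (c != 0) = true := by simp; omega
    simp [runsAux, hne]
  | cons b t ih =>
    intro c hc
    by_cases hb : b = 0
    · subst hb
      have hne : ¬ c = 0 := by omega
      simp [runsAux, hne]
    · have hbne : (b != 0) = true := by simp [hb]
      simp [runsAux, hbne, ih (c + 1) (by omega)]
      ring_nf

theorem runsAux_zero_dropWhile (s : List Int) :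
    runsAux 0 (s.dropWhile (fun b => b == 0)) = runsAux 0 s := by
  induction s with
  | nil => rfl
  | cons b t ih =>
    by_cases hb : b = 0
    · subst hb; simpa [runsAux] using ih
    · simp [List.dropWhile_cons, hb]

theorem fold_flush (col : List Int) : ∀ (acc : List Int) (cur : Int),
    (let p := col.foldl
      (fun (s : List Int × Int) b =>
        if b != 0 then (s.1, s.2 + 1)
        else if s.2 != 0 then (s.1 ++ [s.2], 0) else (s.1, s.2)) (acc, cur)
     if p.2 != 0 then p.1 ++ [p.2] else p.1) = acc ++ runsAux cur col := by
  induction col with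
  | nil =>
    intro acc cur
    by_cases h : cur = 0 <;> simp [runsAux, h]
  | cons b t ih =>
    intro acc cur
    by_cases hb : b = 0
    · subst hb
      by_cases hc : cur = 0
      · subst hc; simpa [runsAux] using ih acc 0
      · simpa [runsAux, hc] using ih (acc ++ [cur]) 0
    · simpa [runsAux, hb] using ih acc (cur + 1)

theorem alt_eq_Bexpr (column pattern : List Int) :
    solved_column_alt column pattern = Bexpr column pattern := by
  have h := fold_flush column [] 0
  simp only [List.nil_append] at h
  simp only [solved_column_alt, Bexpr]
  rw [h]

theorem next1_eq (column : List Int) : ∀ (fuel i : Nat), i ≤ column.length → column.length - i < fuel →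
    pvNext1 column fuel (i : Int) = ((i + ((column.drop i).takeWhile (fun b => b == 0)).length : Nat) : Int) := by
  intro fuel
  induction fuel with
  | zero => intro i h1 h2; omega
  | succ f ih =>
    intro i h1 h2
    by_cases hi : i < column.length
    · have hdrop : column.drop i = column[i] :: column.drop (i+1) := List.drop_eq_getElem_cons hi
      by_cases hz : column[i] = 0
      · have hget : PySem.List.pyGet? column (i : Int) = some 0 := by
          rw [PySem.List.pyGet?_natCast]
          simp [List.getElem?_eq_getElem hi, hz]
        have hstep : pvNext1 column (f+1) (i:Int) = pvNext1 column f ((i:Int)+1) := by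
          simp [pvNext1, hget]; omega
        rw [hstep]
        have := ih (i+1) hi (by omega)
        push_cast at this ⊢
        rw [this, hdrop]
        simp [List.takeWhile_cons, hz]
        push_cast
        ring
      · have hget : ¬ (PySem.List.pyGet? column (i : Int) = some 0) := by
          rw [PySem.List.pyGet?_natCast]
          simp [List.getElem?_eq_getElem hi, hz]
        rw [pvNext1]
        rw [if_neg (fun h => hget h.2)]
        rw [hdrop, List.takeWhile_cons, if_neg (by simpa using hz)]
        simp
    · have hnil : column.drop i = [] := List.drop_eq_nil_of_le (by omega)
      rw [pvNext1]
      have hcond : ¬ ((i:Int) < (column.length:Int) ∧ PySem.List.pyGet? column (i:Int) = some 0) := by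
        push_cast; omega
      rw [if_neg hcond, hnil]
      simp

theorem dropWhile_eq_drop_tw (p : Int → Bool) (l : List Int) :
    l.dropWhile p = l.drop (l.takeWhile p).length := by
  induction l with
  | nil => rfl
  | cons b t ih =>
    by_cases hb : p b
    · simp [List.dropWhile_cons, List.takeWhile_cons, hb, ih]
    · simp [List.dropWhile_cons, List.takeWhile_cons, hb]

theorem head?_dropWhile_zero (l : List Int) :
    (l.dropWhile (fun b => b == 0)).head? ≠ some 0 := by
  induction l with
  | nil => simp
  | cons b t ih =>
    by_cases hb : b = 0
    · simpa [hb] using ih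
    · simp [List.dropWhile_cons, hb]

theorem count_take_iff (s : List Int) : ∀ m : Nat,
    (((s.take m).filter (fun b => b != 0)).length = m) ↔ m ≤ (s.takeWhile (fun b => b != 0)).length := by
  induction s with
  | nil =>
    intro m
    simp
    omega
  | cons b t ih =>
    intro m
    cases m with
    | zero => simp
    | succ m' =>
      by_cases hb : b = 0
      · subst hb
        simp only [List.take_succ_cons, List.filter_cons, List.takeWhile_cons]
        have hle : ((t.take m').filter (fun b => b != 0)).length ≤ m' :=
          le_trans (List.length_filter_le _ _) (by simpa using List.length_take_le m' t)
        simp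
        omega
      · simp only [List.take_succ_cons, List.filter_cons, List.takeWhile_cons]
        simp [hb, ih m']

theorem head_dropWhile_false (p : Int → Bool) (l : List Int) :
    ∀ y, (l.dropWhile p).head? = some y → p y = false := by
  induction l with
  | nil => simp
  | cons b t ih =>
    intro y hy
    by_cases hb : p b
    · exact ih y (by simpa [List.dropWhile_cons, hb] using hy)
    · have hd : List.dropWhile p (b :: t) = b :: t := by rw [List.dropWhile_cons, if_neg hb]
      rw [hd] at hy
      simp at hy
      subst hy
      simpa using hb

theorem drop_head_of_lt_takeWhile (p : Int → Bool) (s : List Int) :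
    ∀ m : Nat, m < (s.takeWhile p).length → ∃ y t', s.drop m = y :: t' ∧ p y = true := by
  induction s with
  | nil => intro m h; simp at h
  | cons b t ih =>
    intro m h
    by_cases hb : p b
    · cases m with
      | zero => exact ⟨b, t, rfl, hb⟩
      | succ m' =>
        rw [List.takeWhile_cons, if_pos hb] at h
        simpa using ih m' (by simpa using h)
    · rw [List.takeWhile_cons, if_neg hb] at h
      simp at h

theorem runsAux_cons_ne (x : Int) (t : List Int) (hx : x ≠ 0) :
    runsAux 0 (x :: t) =
      ((((x :: t).takeWhile (fun b => b != 0)).length : Int)) :: runsAux 0 ((x :: t).dropWhile (fun b => b != 0)) := by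
  have h1 : runsAux 0 (x :: t) = runsAux 1 t := by simp [runsAux, hx]
  rw [h1, runsAux_pos t 1 (by omega)]
  simp [List.takeWhile_cons, List.dropWhile_cons, hx]
  omega

theorem Bexpr_dropWhile (u : List Int) (pat : List Int) :
    Bexpr (u.dropWhile (fun b => b == 0)) pat = Bexpr u pat := by
  simp [Bexpr, runsAux_zero_dropWhile]

theorem Bexpr_nil_pat (s : List Int) (hal : s.head? ≠ some 0) :
    Bexpr s [] = (s == []) := by
  cases s with
  | nil => simp [Bexpr, runsAux]
  | cons x t =>
    have hx : x ≠ 0 := by intro h; exact hal (by simp [h])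
    simp [Bexpr, runsAux_cons_ne x t hx]

theorem Bexpr_zero_cons_nil (rest : List Int) :
    Bexpr [] ((0:Int) :: rest) = Bexpr [] rest := by
  simp [Bexpr, runsAux]

theorem Bexpr_nil_cons_ne (n : Int) (rest : List Int) (hn : n ≠ 0) :
    Bexpr [] (n :: rest) = false := by
  simp [Bexpr, runsAux, hn]

theorem Bexpr_cons_ne_false (x : Int) (t : List Int) (n : Int) (rest : List Int) (hx : x ≠ 0)
    (hn : n ≠ ((((x :: t).takeWhile (fun b => b != 0)).length : Nat) : Int)) :
    Bexpr (x :: t) (n :: rest) = false := by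
  simp [Bexpr, runsAux_cons_ne x t hx]
  intro h
  exact absurd h hn

theorem Bexpr_cons_eq (x : Int) (t : List Int) (rest : List Int) (hx : x ≠ 0) :
    Bexpr (x :: t) (((((x :: t).takeWhile (fun b => b != 0)).length : Nat) : Int) :: rest) =
      Bexpr ((x :: t).dropWhile (fun b => b != 0)) rest := by
  simp [Bexpr, runsAux_cons_ne x t hx]

theorem loopA_eq (column : List Int) : ∀ (pat : List Int) (i : Nat), i ≤ column.length →
    (column.drop i).head? ≠ some 0 →
    pvLoopA column pat (i : Int) = Bexpr (column.drop i) pat := by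
  intro pat
  induction pat with
  | nil =>
    intro i hi hal
    rw [Bexpr_nil_pat _ hal]
    show ((i : Int) == (column.length : Int)) = (column.drop i == [])
    by_cases hlen : i = column.length
    · simp [hlen, List.drop_length]
    · have h1 : ((i:Int) == (column.length:Int)) = false := by simp; omega
      have h2 : ¬ (column.drop i = []) := by
        intro h
        have hlen2 := List.drop_eq_nil_iff.mp h
        omega
      simp [h1, h2]
  | cons n rest ih =>
    intro i hi hal
    simp only [pvLoopA]
    have hlens : (column.drop i).length = column.length - i := List.length_drop
    by_cases hn : 0 ≤ n
    · obtain ⟨m, rfl⟩ : ∃ m : Nat, n = (m : Int) := ⟨n.toNat, (Int.toNat_of_nonneg hn).symm⟩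
      rw [PySem.List.slice_natCast_add]
      set s := column.drop i with hs
      set r := s.takeWhile (fun b => b != 0) with hr
      have hrle : r.length ≤ s.length := (List.takeWhile_prefix _).length_le
      by_cases hm : m ≤ r.length
      · -- group matches
        have hL : ((s.take m).filter (fun b => b != 0)).length = m := (count_take_iff s m).mpr hm
        rw [hL]
        simp only [beq_self_eq_true, Bool.not_true, Bool.false_eq_true, if_false]
        have him : i + m ≤ column.length := by omega
        have hcast : ((i:Int) + (m:Int)) = (((i+m : Nat) : Nat) : Int) := by push_cast; ring
        rw [hcast, next1_eq column (column.length+1) (i+m) him (by omega)]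
        have hdrop2 : column.drop (i+m) = s.drop m := by
          rw [hs, List.drop_drop]
        set zc := ((column.drop (i+m)).takeWhile (fun b => b == 0)).length with hzc
        by_cases hmr : m = r.length
        · -- exactly the run: proceed to the next pattern entry
          have hcond : ((((i+m : Nat) : Int) == (((i+m) + zc : Nat) : Int)) && ((((i+m) : Nat) : Int) < (column.length : Int))) = false := by
            rcases hsd : s.drop m with _ | ⟨y, u⟩
            · -- run reaches the end of the column
              have hsl : s.length ≤ m := by
                have := List.drop_eq_nil_iff.mp hsd
                omega
              have hnlt : ¬ ((((i+m) : Nat) : Int) < (column.length : Int)) := by push_cast; omega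
              simp [hnlt]
              omega
            · -- the cell after the run is 0, so next_1 moves
              have hy : y = 0 := by
                have hdw : s.dropWhile (fun b => b != 0) = y :: u := by
                  rw [dropWhile_eq_drop_tw, ← hr, ← hmr, hsd]
                have := head_dropWhile_false (fun b => b != 0) s y (by rw [hdw]; rfl)
                simpa using this
              have hzc1 : 1 ≤ zc := by
                rw [hzc, hdrop2, hsd, hy]
                simp [List.takeWhile_cons]
              have : ¬ ((((i+m) : Nat) : Int) == (((i+m) + zc : Nat) : Int)) = true := by
                simp; omega
              simp at this
              simp [this]
          rw [hcond]
          simp only [Bool.false_eq_true, if_false]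
          have hzcle : zc ≤ s.length - m := by
            have h1 : zc ≤ (s.drop m).length := by
              rw [hzc, hdrop2]
              exact (List.takeWhile_prefix _).length_le
            simpa using h1
          have hb1 : i + m + zc ≤ column.length := by omega
          have hb2 : (column.drop (i + m + zc)).head? ≠ some 0 := by
            have : column.drop (i + m + zc) = (column.drop (i+m)).drop zc := by
              rw [List.drop_drop]
            rw [this, hzc, ← dropWhile_eq_drop_tw]
            exact head?_dropWhile_zero _
          rw [ih (i + m + zc) hb1 hb2]
          have hrw : column.drop (i + m + zc) = (s.drop m).dropWhile (fun b => b == 0) := by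
            have h1 : column.drop (i + m + zc) = (column.drop (i+m)).drop zc := by
              rw [List.drop_drop]
            rw [h1, hzc, ← dropWhile_eq_drop_tw, hdrop2]
          rw [hrw, Bexpr_dropWhile]
          -- now: Bexpr (s.drop m) rest = Bexpr s (↑m :: rest)
          rcases hcase : s with _ | ⟨x, t⟩
          · -- s empty: r = [], m = 0
            have hr0 : r.length = 0 := by rw [hr, hcase]; simp
            have hm0 : m = 0 := by omega
            subst hm0
            simp [Bexpr_zero_cons_nil]
          · have hx : x ≠ 0 := by
              intro h
              apply hal
              rw [hcase, h]
              rfl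
            rw [hcase] at hr
            have hth : List.drop m (x :: t) = (x :: t).dropWhile (fun b => b != 0) := by
              rw [dropWhile_eq_drop_tw, ← hr, ← hmr]
            rw [hth, hmr, hr]
            exact (Bexpr_cons_eq x t rest hx).symm
        · -- m < r.length: the run continues right after the slice → A returns False
          have hmlt : m < r.length := by omega
          obtain ⟨y, t', hsd, hy⟩ := drop_head_of_lt_takeWhile (fun b => b != 0) s m (by omega)
          have hy0 : y ≠ 0 := by simpa using hy
          have hzc0 : zc = 0 := by
            rw [hzc, hdrop2, hsd]
            simp [List.takeWhile_cons, hy0]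
          have hcond : ((((i+m : Nat) : Int) == (((i+m) + zc : Nat) : Int)) && ((((i+m) : Nat) : Int) < (column.length : Int))) = true := by
            have hlt : i + m < column.length := by
              have : m < s.length := by omega
              omega
            rw [hzc0]
            simp
            push_cast
            omega
          rw [hcond]
          simp only [if_true]
          rcases hcase : s with _ | ⟨x, t⟩
          · rw [hcase] at hr; rw [hr] at hmlt; simp at hmlt
          · have hx : x ≠ 0 := by
              intro h
              apply hal
              rw [hcase, h]
              rfl
            rw [hcase] at hr
            rw [Bexpr_cons_ne_false x t (m : Int) rest hx]
            rw [← hr]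
            intro h
            have : m = r.length := by exact_mod_cast h
            omega
      · -- group does not match → A returns False
        have hL : ¬ (((s.take m).filter (fun b => b != 0)).length = m) := by
          intro h
          exact hm ((count_take_iff s m).mp h)
        have hg : ((((s.take m).filter (fun b => b != 0)).length : Int) == (m : Int)) = false := by
          simp
          intro h
          exact hL (by exact_mod_cast h)
        rw [hg]
        simp only [Bool.not_false, if_true]
        rcases hcase : s with _ | ⟨x, t⟩
        · have hr0 : r.length = 0 := by rw [hr, hcase]; simp
          have hm0 : m ≠ 0 := by omega
          rw [Bexpr_nil_cons_ne (m : Int) rest (by exact_mod_cast hm0)]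
        · have hx : x ≠ 0 := by
            intro h
            apply hal
            rw [hcase, h]
            rfl
          rw [hcase] at hr
          rw [Bexpr_cons_ne_false x t (m : Int) rest hx]
          rw [← hr]
          intro h
          have : m = r.length := by exact_mod_cast h
          omega
    · -- n < 0: the count (a Nat) can never equal n → A returns False
      have hg : ((((PySem.List.slice column (some (i:Int)) (some ((i:Int) + n))).filter (fun b => b != 0)).length : Int) == n) = false := by
        simp
        omega
      rw [hg]
      simp only [Bool.not_false, if_true]
      rcases hcase : column.drop i with _ | ⟨x, t⟩
      · rw [Bexpr_nil_cons_ne n rest (by omega)]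
      · have hx : x ≠ 0 := by
          intro h
          apply hal
          rw [hcase, h]
          rfl
        rw [Bexpr_cons_ne_false x t n rest hx]
        have : (0:Int) ≤ (((x :: t).takeWhile (fun b => b != 0)).length : Int) := by positivity
        omega

theorem a_eq_Bexpr (column pattern : List Int) :
    solved_column column pattern = Bexpr column pattern := by
  unfold solved_column
  set z := (column.takeWhile (fun b => b == 0)).length with hz
  have hzle : z ≤ column.length := (List.takeWhile_prefix _).length_le
  have h0 : pvNext1 column (column.length+1) ((0:Nat) : Int) = ((0 + z : Nat) : Int) := by
    rw [next1_eq column (column.length+1) 0 (by omega) (by omega)]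
    simp [hz]
  simp only [Nat.cast_zero, Nat.zero_add] at h0
  rw [h0]
  have hal : (column.drop z).head? ≠ some 0 := by
    rw [hz, ← dropWhile_eq_drop_tw]
    exact head?_dropWhile_zero _
  rw [loopA_eq column pattern z hzle hal]
  rw [show column.drop z = column.dropWhile (fun b => b == 0) by rw [hz, ← dropWhile_eq_drop_tw]]
  exact Bexpr_dropWhile column pattern

-- ===== VERDICT (by name: the statement is the Claim_ definition above) =====
theorem solved_column_spec : Claim_equal_solved_column := by
  intro column pattern _
  unfold Spec_solved_column
  rw [a_eq_Bexpr, alt_eq_Bexpr]
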